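-- pv_equiv track=rewrite | github.com/EPiCS/reconos | tools/mhs.py | ntob
-- ===== SOURCE A (Python) =====
-- def ntob(x, n):
--         s = "";
--         for i in range(0, n):
--                 if (x << i) & (1 << n-1):
--                         s += "1";
--                 else:
--                         s += "0";
--         return s;
-- ===== SOURCE B (Python) =====
-- def ntob(x, n):
--     # Iterative: peel off the least-significant bit each round and prepend it,
--     # building the string back-to-front.
--     s = ""
--     while n >= 1:
--         s = ("1" if x & 1 else "0") + s
--         x >>= 1
--         n -= 1
--     return s
-- ===== Notes on version B (the rewrite author's own statement) =====
-- stated objective: alternative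
-- what changed: A scans bit positions MSB-first with a left-shift-and-mask test appended to a growing string; B recurses on the width, peeling off the least-significant bit (x & 1) and shifting x right, building the string back-to-front.
import Mathlib
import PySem

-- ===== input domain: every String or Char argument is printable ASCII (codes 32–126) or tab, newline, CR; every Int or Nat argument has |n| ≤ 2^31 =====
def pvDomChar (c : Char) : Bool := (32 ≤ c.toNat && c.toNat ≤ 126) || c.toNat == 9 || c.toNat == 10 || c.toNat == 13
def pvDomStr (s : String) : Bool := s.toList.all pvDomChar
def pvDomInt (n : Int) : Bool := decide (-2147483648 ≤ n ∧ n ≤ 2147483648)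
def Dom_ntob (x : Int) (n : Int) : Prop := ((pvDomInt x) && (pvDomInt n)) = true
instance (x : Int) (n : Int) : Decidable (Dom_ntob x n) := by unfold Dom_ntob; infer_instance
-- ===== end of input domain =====

-- B replaces A's left-shift/mask loop by a recursion that peels off the least-significant
-- bit and builds the string back-to-front (alternative decomposition, same cost).


-- ===== PORT A =====
def ntob (x : Int) (n : Int) : String :=
  (PySem.List.pyRange 0 n 1).foldl
    (fun s i =>
      if PySem.Int.band (x <<< i.toNat) ((1 : Int) <<< (n - 1).toNat) ≠ 0 then s ++ "1"
      else s ++ "0")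
    ""

-- ===== PORT B =====
def ntobAltLoop (x : Int) (n : Int) (s : String) : String :=
  if 1 ≤ n then
    ntobAltLoop (x >>> (1 : Int)) (n - 1) ((if PySem.Int.band x 1 ≠ 0 then "1" else "0") ++ s)
  else s
termination_by n.toNat
decreasing_by omega

def ntob_alt (x : Int) (n : Int) : String := ntobAltLoop x n ""

-- ===== PRECONDITION & SPEC =====
def Spec_ntob (x : Int) (n : Int) (out : String) : Prop := out = ntob_alt x n
instance (x : Int) (n : Int) (out : String) : Decidable (Spec_ntob x n out) := by unfold Spec_ntob; infer_instance

-- ===== CLAIM (what is proved, stated in full; the proofs are below) =====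
def Claim_equal_ntob : Prop := ∀ (x : Int) (n : Int), Dom_ntob x n → Spec_ntob x n (ntob x n)

-- ===== LEMMAS AND PROOFS =====

/-- Two's-complement bit `k` of the integer `x`. -/
def pvBit (x : Int) (k : Nat) : Bool :=
  if 0 ≤ x then x.toNat.testBit k else !((-x - 1).toNat.testBit k)

/-- Bit character '0'/'1'. -/
def bitc (x : Int) (k : Nat) : Char := if pvBit x k then '1' else '0'

lemma one_shiftLeft_int (k : Nat) : ((1 : Int) <<< k) = ((2 ^ k : Nat) : Int) := by
  rw [Int.shiftLeft_eq]; push_cast; ring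

/-- `band` with a power of two tests the corresponding two's-complement bit. -/
lemma band_pow (a : Int) (k : Nat) :
    (PySem.Int.band a ((1 : Int) <<< k) ≠ 0) ↔ pvBit a k = true := by
  rw [one_shiftLeft_int]
  have hb : (0 : Int) ≤ ((2 ^ k : Nat) : Int) := by positivity
  unfold PySem.Int.band pvBit
  by_cases ha : 0 ≤ a
  · rw [if_pos ha, if_pos hb, if_pos ha, Int.toNat_natCast, Nat.and_two_pow]
    cases _h : a.toNat.testBit k <;> simp
  · rw [if_neg ha, if_pos hb, if_neg ha, Int.toNat_natCast, Nat.and_comm, Nat.and_two_pow]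
    cases _h : (-a - 1).toNat.testBit k <;> simp

/-- Shifting in `j` low bits below `a` then testing bit `t + j` reads bit `t` of `a`. -/
lemma nat_bit_shift (a b j t : Nat) (hb : b < 2 ^ j) :
    (a * 2 ^ j + b).testBit (t + j) = a.testBit t := by
  have hdiv : (a * 2 ^ j + b) / 2 ^ j = a := by
    rw [mul_comm, Nat.mul_add_div (Nat.two_pow_pos j), Nat.div_eq_of_lt hb, Nat.add_zero]
  rw [← Nat.testBit_div_two_pow (a * 2 ^ j + b) t, hdiv]

/-- Left shift moves bits up. -/
lemma bit_shiftLeft (x : Int) (j K : Nat) (h : j ≤ K) :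
    pvBit (x <<< j) K = pvBit x (K - j) := by
  obtain ⟨t, rfl⟩ : ∃ t, K = t + j := ⟨K - j, by omega⟩
  rw [Nat.add_sub_cancel, Int.shiftLeft_eq]
  by_cases hx : 0 ≤ x
  · obtain ⟨m, rfl⟩ := Int.eq_ofNat_of_zero_le hx
    have h0 : (0 : Int) ≤ (m : Int) * 2 ^ j := by positivity
    unfold pvBit
    rw [if_pos h0, if_pos hx]
    have hcast : ((m : Int) * 2 ^ j).toNat = m * 2 ^ j := by
      have h1 : ((m : Int) * 2 ^ j) = ((m * 2 ^ j : Nat) : Int) := by push_cast; ring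
      rw [h1, Int.toNat_natCast]
    rw [hcast, Nat.testBit_mul_two_pow, Int.toNat_natCast]
    simp [Nat.le_add_left j t]
  · have hx' : x < 0 := by omega
    have hm : ((-x - 1).toNat : Int) = -x - 1 := Int.toNat_of_nonneg (by omega)
    set m : Nat := (-x - 1).toNat with hmdef
    have hxm : x = -(m : Int) - 1 := by omega
    have h2p : (0 : Int) < 2 ^ j := by positivity
    have hneg : x * 2 ^ j < 0 := by nlinarith
    unfold pvBit
    rw [if_neg (not_le.mpr hneg), if_neg hx]
    have h3 : (1 : Nat) ≤ 2 ^ j := Nat.two_pow_pos j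
    have key : (-(x * 2 ^ j) - 1).toNat = m * 2 ^ j + (2 ^ j - 1) := by
      have h1 : (-(x * 2 ^ j) - 1) = ((m * 2 ^ j + (2 ^ j - 1) : Nat) : Int) := by
        push_cast [h3]
        rw [hxm]; ring
      rw [h1, Int.toNat_natCast]
    rw [key, nat_bit_shift m (2 ^ j - 1) j t (by omega)]

/-- Arithmetic right shift by one drops the lowest bit. -/
lemma bit_half (x : Int) (k : Nat) : pvBit (x >>> (1 : Int)) k = pvBit x (k + 1) := by
  have hsr : x >>> (1 : Int) = x / 2 := by
    rw [show (1 : Int) = ((1 : Nat) : Int) by norm_num, Int.shiftRight_natCast_right,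
      Int.shiftRight_eq_div_pow]
    norm_num
  rw [hsr]
  by_cases hx : 0 ≤ x
  · obtain ⟨m, rfl⟩ := Int.eq_ofNat_of_zero_le hx
    have h2 : ((m : Int)) / 2 = ((m / 2 : Nat) : Int) := by rw [Int.natCast_div]; norm_num
    unfold pvBit
    rw [h2, if_pos (by positivity), if_pos hx, Int.toNat_natCast, Nat.testBit_div_two,
      Int.toNat_natCast]
  · have hx' : x < 0 := by omega
    have hm : ((-x - 1).toNat : Int) = -x - 1 := Int.toNat_of_nonneg (by omega)
    set m : Nat := (-x - 1).toNat with hmdef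
    have hhalf : x / 2 < 0 := by omega
    unfold pvBit
    rw [if_neg (not_le.mpr hhalf), if_neg hx]
    have key : (-(x / 2) - 1).toNat = m / 2 := by
      have h1 : (-(x / 2) - 1) = ((m : Int)) / 2 := by omega
      have h2 : ((m : Int)) / 2 = ((m / 2 : Nat) : Int) := by rw [Int.natCast_div]; norm_num
      rw [h1, h2, Int.toNat_natCast]
    rw [key, Nat.testBit_div_two]

/-- A's string-building fold, characterised as a map. -/
lemma foldl_bits_spec (x : Int) (M : Nat) (l : List Int) (s : String) :
    l.foldl
        (fun s i =>
          if PySem.Int.band (x <<< i.toNat) ((1 : Int) <<< M) ≠ 0 then s ++ "1" else s ++ "0")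
        s
      = s ++ String.ofList
          (l.map (fun i =>
            if PySem.Int.band (x <<< i.toNat) ((1 : Int) <<< M) ≠ 0 then '1' else '0')) := by
  induction l generalizing s with
  | nil => simp
  | cons a t ih =>
    simp only [List.foldl_cons, List.map_cons]
    rw [ih]
    by_cases hp : PySem.Int.band (x <<< ((a.toNat : Nat) : Int)) ((1 : Int) <<< M) ≠ 0
    · rw [if_pos hp, if_pos hp,
        show ('1' :: t.map (fun i =>
            if PySem.Int.band (x <<< i.toNat) ((1 : Int) <<< M) ≠ 0 then '1' else '0'))
          = ['1'] ++ t.map (fun i =>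
            if PySem.Int.band (x <<< i.toNat) ((1 : Int) <<< M) ≠ 0 then '1' else '0') from rfl,
        String.ofList_append, ← String.append_assoc]
    · rw [if_neg hp, if_neg hp,
        show ('0' :: t.map (fun i =>
            if PySem.Int.band (x <<< i.toNat) ((1 : Int) <<< M) ≠ 0 then '1' else '0'))
          = ['0'] ++ t.map (fun i =>
            if PySem.Int.band (x <<< i.toNat) ((1 : Int) <<< M) ≠ 0 then '1' else '0') from rfl,
        String.ofList_append, ← String.append_assoc]

/-- Characterisation of A's port on natural widths. -/
lemma ntob_char (x : Int) (m : Nat) :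
    ntob x (m : Int)
      = String.ofList ((List.range m).map (fun j => bitc x (m - 1 - j))) := by
  unfold ntob
  rw [foldl_bits_spec x (((m : Int) - 1).toNat) (PySem.List.pyRange 0 (m : Int) 1) "",
    PySem.List.pyRange_zero_nat, List.map_map, String.empty_append]
  have hM : ((m : Int) - 1).toNat = m - 1 := by omega
  congr 1
  apply List.map_congr_left
  intro k hk
  have hklt : k < m := List.mem_range.mp hk
  simp only [Function.comp_apply, Int.toNat_natCast, Int.shiftLeft_natCast_right, hM]
  have hiff : (PySem.Int.band (x <<< k) ((1 : Int) <<< (m - 1)) ≠ 0) ↔ pvBit x (m - 1 - k) = true :=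
    (band_pow (x <<< k) (m - 1)).trans (by rw [bit_shiftLeft x k (m - 1) (by omega)])
  simp only [hiff]
  simp [bitc]

/-- B's loop prepends the bits of `x` below width `m` in front of `s`. -/
lemma ntobAltLoop_char (m : Nat) : ∀ (x : Int) (s : String),
    ntobAltLoop x (m : Int) s
      = String.ofList ((List.range m).map (fun j => bitc x (m - 1 - j))) ++ s := by
  induction m with
  | zero =>
    intro x s
    unfold ntobAltLoop
    rw [if_neg (by norm_num : ¬ (1 : Int) ≤ ((0 : Nat) : Int))]
    simp
  | succ m ih =>
    intro x s
    unfold ntobAltLoop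
    rw [if_pos (by push_cast; omega : (1 : Int) ≤ ((m + 1 : Nat) : Int)),
      show ((m + 1 : Nat) : Int) - 1 = (m : Int) by push_cast; ring, ih (x >>> (1 : Int))]
    have h1 : ∀ j ∈ List.range m, bitc (x >>> (1 : Int)) (m - 1 - j) = bitc x (m + 1 - 1 - j) := by
      intro j hj
      have hjlt : j < m := List.mem_range.mp hj
      have hb : pvBit (x >>> (1 : Int)) (m - 1 - j) = pvBit x (m + 1 - 1 - j) := by
        rw [bit_half]; congr 1; omega
      simp [bitc, hb]
    rw [List.map_congr_left h1]
    have h2 : (if PySem.Int.band x 1 ≠ 0 then "1" else "0")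
        = String.ofList [bitc x (m + 1 - 1 - m)] := by
      have h10 : ((1 : Int) <<< (0 : Nat)) = 1 := by decide
      have hiff : (PySem.Int.band x 1 ≠ 0) ↔ pvBit x 0 = true := by
        have hbp := band_pow x 0
        rw [h10] at hbp
        exact hbp
      rw [if_congr hiff rfl rfl, show m + 1 - 1 - m = 0 by omega]
      cases h : pvBit x 0 <;> simp [bitc, h]
    rw [h2, ← String.append_assoc, ← String.ofList_append,
      show (List.range m).map (fun j => bitc x (m + 1 - 1 - j)) ++ [bitc x (m + 1 - 1 - m)]
        = (List.range (m + 1)).map (fun j => bitc x (m + 1 - 1 - j)) by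
        rw [List.range_succ, List.map_append]; rfl]

/-- Characterisation of B's port on natural widths. -/
lemma ntob_alt_char (x : Int) (m : Nat) :
    ntob_alt x (m : Int)
      = String.ofList ((List.range m).map (fun j => bitc x (m - 1 - j))) := by
  unfold ntob_alt
  rw [ntobAltLoop_char m x "", String.append_empty]

-- ===== VERDICT (by name: the statement is the Claim_ definition above) =====
theorem ntob_spec : Claim_equal_ntob := by
  intro x n _
  unfold Spec_ntob
  rcases le_or_gt 1 n with h | h
  · have hm : n = ((n.toNat : Nat) : Int) := by omega
    rw [hm, ntob_char, ntob_alt_char]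
  · have h1 : PySem.List.pyRange 0 n 1 = [] := PySem.List.pyRange_one_eq_nil (by omega)
    unfold ntob ntob_alt ntobAltLoop
    rw [h1, if_neg (show ¬ (1 : Int) ≤ n by omega)]
    rfl
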